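-- pv_equiv track=rewrite | github.com/scout719/adventOfCode | 2024/adventOfCode_04.py | day4_solve
-- ===== SOURCE A (Python) =====
-- def day4_parse(data: list[str]):
--     return data
--
-- def day4_solve(data, part2):
--     data = day4_parse(data)
--     R, C = len(data), len(data[0])
--     WORDS = [
--         ["XMAS",
--          "....",
--          "....",
--          "...."],
--         ["SAMX",
--          "....",
--          "....",
--          "...."],
--         ["X...",
--          "M...",
--          "A...",
--          "S..."],
--         ["S...",
--          "A...",
--          "M...",
--          "X..."],
--         ["X...",
--          ".M..",
--          "..A.",
--          "...S"],
--         ["...X",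
--          "..M.",
--          ".A..",
--          "S..."],
--         ["S...",
--          ".A..",
--          "..M.",
--          "...X"],
--         ["...S",
--          "..A.",
--          ".M..",
--          "X..."],
--     ]
--     if part2:
--         WORDS = [
--             ["M.M",
--              ".A.",
--              "S.S"],
--             ["M.S",
--              ".A.",
--              "M.S"],
--             ["S.M",
--              ".A.",
--              "S.M"],
--             ["S.S",
--              ".A.",
--              "M.M"]
--         ]
--     ans = 0
--     for r in range(R):
--         for c in range(C):
--             for word in WORDS:
--                 found = True
--                 for dr, w_r in enumerate(word):
--                     for dc, ch in enumerate(w_r):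
--                         rr, cc = r + dr, c + dc
--                         if ch != ".":
--                             if not (0 <= rr < R and 0 <= cc < C):
--                                 found = False
--                                 break
--                             if data[rr][cc] != ch:
--                                 found = False
--                                 break
--                     if not found:
--                         break
--                 if found:
--                     ans += 1
--     return ans
-- ===== SOURCE B (Python) =====
-- def day4_solve(data, part2):
--     R, C = len(data), len(data[0])
--
--     def at(r, c):
--         if 0 <= r < R and 0 <= c < C:
--             return data[r][c]
--         return None
--
--     def mas(a, b):
--         return (a == 'M' and b == 'S') or (a == 'S' and b == 'M')
--
--     ans = 0
--     if part2:
--         for r in range(R):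
--             for c in range(C):
--                 if at(r + 1, c + 1) == 'A' \
--                         and mas(at(r, c), at(r + 2, c + 2)) \
--                         and mas(at(r, c + 2), at(r + 2, c)):
--                     ans += 1
--     else:
--         for r in range(R):
--             for c in range(C):
--                 for dr, dc in ((0, 1), (1, 0), (1, 1), (1, -1)):
--                     word = [at(r + i * dr, c + i * dc) for i in range(4)]
--                     if word == list("XMAS") or word == list("SAMX"):
--                         ans += 1
--     return ans
-- ===== Notes on version B (the rewrite author's own statement) =====
-- stated objective: simpler
-- what changed: Replaces A's eight 4x4 (resp. four 3x3) dotted stencil templates matched cell-by-cell over a 16-cell mask with a direct scan: for part 1 each cell checks the 4-letter word along the four direction vectors right/down/diagonal/anti-diagonal for 'XMAS' or 'SAMX', and for part 2 each cell checks the X-shape (centre 'A' plus two M/S diagonal pairs) directly.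
import Mathlib
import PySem

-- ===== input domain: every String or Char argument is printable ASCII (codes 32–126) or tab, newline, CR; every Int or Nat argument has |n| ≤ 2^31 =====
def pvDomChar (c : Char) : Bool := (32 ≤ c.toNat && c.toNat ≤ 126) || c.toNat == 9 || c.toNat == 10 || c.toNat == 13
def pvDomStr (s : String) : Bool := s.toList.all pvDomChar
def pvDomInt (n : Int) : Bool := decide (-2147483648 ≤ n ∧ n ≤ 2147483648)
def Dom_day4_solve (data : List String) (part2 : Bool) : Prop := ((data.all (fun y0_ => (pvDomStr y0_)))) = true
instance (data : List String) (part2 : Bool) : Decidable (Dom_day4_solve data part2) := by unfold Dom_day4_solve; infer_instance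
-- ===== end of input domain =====

-- B replaces A's dotted 4x4 / 3x3 stencil templates with a plain direction-vector scan
-- (per cell: 'XMAS'/'SAMX' along 4 directions, resp. a direct X-of-'MAS' check): simpler, same cost.

-- ===== PORT A =====
-- exact stand-in for the Python access data[rr][cc]: Pre_ guarantees every access A
-- performs is in range, so the `getD` defaults are never reached on admitted inputs
def pyCharAt (data : List String) (rr cc : Int) : Char :=
  (PySem.Str.pyGet? ((PySem.List.pyGet? data rr).getD "") cc).getD ' '

def day4_parse (data : List String) : List String := data

def day4_WORDS1 : List (List String) :=
  [["XMAS", "....", "....", "...."],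
   ["SAMX", "....", "....", "...."],
   ["X...", "M...", "A...", "S..."],
   ["S...", "A...", "M...", "X..."],
   ["X...", ".M..", "..A.", "...S"],
   ["...X", "..M.", ".A..", "S..."],
   ["S...", ".A..", "..M.", "...X"],
   ["...S", "..A.", ".M..", "X..."]]

def day4_WORDS2 : List (List String) :=
  [["M.M", ".A.", "S.S"],
   ["M.S", ".A.", "M.S"],
   ["S.M", ".A.", "S.M"],
   ["S.S", ".A.", "M.M"]]

-- A's found-flag/break double loop: value-wise it is exactly the short-circuit
-- conjunction over enumerate(word) / enumerate(w_r), in the same probe order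
def day4_found (data : List String) (R C r c : Int) (word : List String) : Bool :=
  (PySem.List.enumerate word).all (fun dRow =>
    (PySem.List.enumerate dRow.2.toList).all (fun dCol =>
      dCol.2 == '.' ||
        (decide (0 ≤ r + dRow.1 ∧ r + dRow.1 < R ∧ 0 ≤ c + dCol.1 ∧ c + dCol.1 < C) &&
          (pyCharAt data (r + dRow.1) (c + dCol.1) == dCol.2))))

def day4_solve (data : List String) (part2 : Bool) : Int :=
  let dat := day4_parse data
  let R : Int := (dat.length : Int)
  let C : Int := PySem.Str.len ((PySem.List.pyGet? dat 0).getD "")  -- len(data[0]); IndexError on [] is outside Pre_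
  let WORDS := if part2 then day4_WORDS2 else day4_WORDS1
  (PySem.List.pyRange 0 R 1).foldl (fun ans r =>
    (PySem.List.pyRange 0 C 1).foldl (fun ans c =>
      WORDS.foldl (fun ans word => if day4_found dat R C r c word then ans + 1 else ans) ans) ans) 0

-- ===== PORT B =====
-- port of Source B's at(): in-bounds lookup, None when outside the grid
def day4_alt_at (data : List String) (R C r c : Int) : Option Char :=
  if 0 ≤ r ∧ r < R ∧ 0 ≤ c ∧ c < C then some (pyCharAt data r c) else none

-- port of Source B's mas(a, b)
def day4_alt_mas (a b : Option Char) : Bool :=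
  (a == some 'M' && b == some 'S') || (a == some 'S' && b == some 'M')

def day4_alt_dirs : List (Int × Int) := [(0, 1), (1, 0), (1, 1), (1, -1)]

-- the comprehension [at(r+i*dr, c+i*dc) for i in range(4)]
def day4_alt_word (data : List String) (R C r c dr dc : Int) : List (Option Char) :=
  (PySem.List.pyRange 0 4 1).map (fun i => day4_alt_at data R C (r + i * dr) (c + i * dc))

def day4_solve_alt (data : List String) (part2 : Bool) : Int :=
  let R : Int := (data.length : Int)
  let C : Int := PySem.Str.len ((PySem.List.pyGet? data 0).getD "")  -- len(data[0]); IndexError on [] is outside Pre_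
  if part2 then
    (PySem.List.pyRange 0 R 1).foldl (fun ans r =>
      (PySem.List.pyRange 0 C 1).foldl (fun ans c =>
        if day4_alt_at data R C (r + 1) (c + 1) == some 'A'
            && day4_alt_mas (day4_alt_at data R C r c) (day4_alt_at data R C (r + 2) (c + 2))
            && day4_alt_mas (day4_alt_at data R C r (c + 2)) (day4_alt_at data R C (r + 2) c)
        then ans + 1 else ans) ans) 0
  else
    (PySem.List.pyRange 0 R 1).foldl (fun ans r =>
      (PySem.List.pyRange 0 C 1).foldl (fun ans c =>
        day4_alt_dirs.foldl (fun ans d =>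
          if day4_alt_word data R C r c d.1 d.2 == [some 'X', some 'M', some 'A', some 'S']
              || day4_alt_word data R C r c d.1 d.2 == [some 'S', some 'A', some 'M', some 'X']
          then ans + 1 else ans) ans) ans) 0

-- ===== PRECONDITION & SPEC =====
-- Exactly the inputs on which Python A returns: a nonempty grid whose rows are all at least
-- as long as the first row (A raises IndexError on [] and whenever a probed row is shorter
-- than len(data[0]); when len(data[0]) = 0 no cell is ever probed and A returns 0).
def Pre_day4_solve (data : List String) (part2 : Bool) : Prop :=
  data ≠ [] ∧ ∀ s ∈ data, (data.headD "").toList.length ≤ s.toList.length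
instance (data : List String) (part2 : Bool) : Decidable (Pre_day4_solve data part2) := by
  unfold Pre_day4_solve; infer_instance

def pvWitness_day4_solve : List String × Bool := (["XMAS", "MMAS", "AMAS", "SMAS"], false)

def Spec_day4_solve (data : List String) (part2 : Bool) (out : Int) : Prop := out = day4_solve_alt data part2
instance (data : List String) (part2 : Bool) (out : Int) : Decidable (Spec_day4_solve data part2 out) := by unfold Spec_day4_solve; infer_instance

-- ===== CLAIM (what is proved, stated in full; the proofs are below) =====
def Claim_equal_day4_solve : Prop := ∀ (data : List String) (part2 : Bool), Dom_day4_solve data part2 → Pre_day4_solve data part2 → Spec_day4_solve data part2 (day4_solve data part2)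

-- ===== LEMMAS AND PROOFS =====

-- 0/1 indicator
def pvInd (b : Bool) : Int := if b then 1 else 0

-- A's per-cell contribution: how many of the templates match anchored at (r, c)
def pvA (data : List String) (R C : Int) (W : List (List String)) (r c : Int) : Int :=
  (W.map (fun w => pvInd (day4_found data R C r c w))).sum

-- B's per-cell contribution for part 1
def pvB1cell (data : List String) (R C r c : Int) : Int :=
  (day4_alt_dirs.map (fun d =>
    pvInd (day4_alt_word data R C r c d.1 d.2 == [some 'X', some 'M', some 'A', some 'S']
        || day4_alt_word data R C r c d.1 d.2 == [some 'S', some 'A', some 'M', some 'X']))).sum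

-- B's per-cell condition for part 2
def pvB2cond (data : List String) (R C r c : Int) : Bool :=
  day4_alt_at data R C (r + 1) (c + 1) == some 'A'
    && day4_alt_mas (day4_alt_at data R C r c) (day4_alt_at data R C (r + 2) (c + 2))
    && day4_alt_mas (day4_alt_at data R C r (c + 2)) (day4_alt_at data R C (r + 2) c)

-- part-1 helpers: the three anchor-aligned directions (right, down, diagonal), and the
-- anti-diagonal word read down-left from (r, x); A's two anti-diagonal templates anchored
-- at column c are the down-left read from column x = c + 3
def pvG (data : List String) (R C r c : Int) : Int :=
  pvInd ((day4_alt_at data R C r c == some 'X' && (day4_alt_at data R C r (c + 1) == some 'M' && (day4_alt_at data R C r (c + 2) == some 'A' && day4_alt_at data R C r (c + 3) == some 'S')))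
      || (day4_alt_at data R C r c == some 'S' && (day4_alt_at data R C r (c + 1) == some 'A' && (day4_alt_at data R C r (c + 2) == some 'M' && day4_alt_at data R C r (c + 3) == some 'X'))))
  + pvInd ((day4_alt_at data R C r c == some 'X' && (day4_alt_at data R C (r + 1) c == some 'M' && (day4_alt_at data R C (r + 2) c == some 'A' && day4_alt_at data R C (r + 3) c == some 'S')))
      || (day4_alt_at data R C r c == some 'S' && (day4_alt_at data R C (r + 1) c == some 'A' && (day4_alt_at data R C (r + 2) c == some 'M' && day4_alt_at data R C (r + 3) c == some 'X'))))
  + pvInd ((day4_alt_at data R C r c == some 'X' && (day4_alt_at data R C (r + 1) (c + 1) == some 'M' && (day4_alt_at data R C (r + 2) (c + 2) == some 'A' && day4_alt_at data R C (r + 3) (c + 3) == some 'S')))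
      || (day4_alt_at data R C r c == some 'S' && (day4_alt_at data R C (r + 1) (c + 1) == some 'A' && (day4_alt_at data R C (r + 2) (c + 2) == some 'M' && day4_alt_at data R C (r + 3) (c + 3) == some 'X'))))

def pvF (data : List String) (R C r x : Int) : Int :=
  pvInd ((day4_alt_at data R C r x == some 'X' && (day4_alt_at data R C (r + 1) (x + -1) == some 'M' && (day4_alt_at data R C (r + 2) (x + -2) == some 'A' && day4_alt_at data R C (r + 3) (x + -3) == some 'S')))
      || (day4_alt_at data R C r x == some 'S' && (day4_alt_at data R C (r + 1) (x + -1) == some 'A' && (day4_alt_at data R C (r + 2) (x + -2) == some 'M' && day4_alt_at data R C (r + 3) (x + -3) == some 'X'))))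

-- generic: a foldl whose body adds a per-element amount is init + sum
lemma foldl_body_sum {α : Type} (l : List α) (F : Int → α → Int) (g : α → Int) (a : Int)
    (h : ∀ acc : Int, ∀ x ∈ l, F acc x = acc + g x) : l.foldl F a = a + (l.map g).sum := by
  rw [PySem.List.foldl_congr_mem l F (fun acc x => acc + g x) a h, PySem.List.foldl_add]

lemma pvStep {α : Type} (p : α → Bool) (l : List α) :
    ∀ acc : Int, ∀ x ∈ l, (if p x then acc + 1 else acc) = acc + pvInd (p x) := by
  intro acc x _; unfold pvInd; by_cases h : p x <;> simp [h]

-- the bridge between A's bounds-check-then-probe and B's at()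
lemma pvAtom (data : List String) (R C rr cc : Int) (ch : Char) :
    (decide (0 ≤ rr ∧ rr < R ∧ 0 ≤ cc ∧ cc < C) && (pyCharAt data rr cc == ch))
      = (day4_alt_at data R C rr cc == some ch) := by
  unfold day4_alt_at
  by_cases h : 0 ≤ rr ∧ rr < R ∧ 0 ≤ cc ∧ cc < C <;> simp [h]

-- merging a mutually exclusive 'XMAS'/'SAMX' pair of indicators into one disjunction
lemma pvPair (q0 q1 q2 q3 : Option Char) :
    pvInd ((q0 == some 'X' && (q1 == some 'M' && (q2 == some 'A' && q3 == some 'S')))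
        || (q0 == some 'S' && (q1 == some 'A' && (q2 == some 'M' && q3 == some 'X'))))
      = pvInd (q0 == some 'X' && (q1 == some 'M' && (q2 == some 'A' && q3 == some 'S')))
      + pvInd (q0 == some 'S' && (q1 == some 'A' && (q2 == some 'M' && q3 == some 'X'))) := by
  by_cases h0 : q0 = some 'X' <;> by_cases h1 : q0 = some 'S' <;> simp_all [pvInd]

lemma pvTri (q : Option Char) : q = some 'M' ∨ q = some 'S' ∨ (q ≠ some 'M' ∧ q ≠ some 'S') := by
  tauto

-- part 2, per cell: the four corner templates sum to B's X-shape indicator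
lemma pvCell2 (q00 q02 q11 q20 q22 : Option Char) :
    pvInd ((q00 == some 'M' && q02 == some 'M') && (q11 == some 'A' && (q20 == some 'S' && q22 == some 'S')))
      + (pvInd ((q00 == some 'M' && q02 == some 'S') && (q11 == some 'A' && (q20 == some 'M' && q22 == some 'S')))
      + (pvInd ((q00 == some 'S' && q02 == some 'M') && (q11 == some 'A' && (q20 == some 'S' && q22 == some 'M')))
      + (pvInd ((q00 == some 'S' && q02 == some 'S') && (q11 == some 'A' && (q20 == some 'M' && q22 == some 'M')))
      + 0)))
      = pvInd (q11 == some 'A' && day4_alt_mas q00 q22 && day4_alt_mas q02 q20) := by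
  rcases pvTri q00 with h00 | h00 | ⟨h00, h00'⟩ <;>
    rcases pvTri q02 with h02 | h02 | ⟨h02, h02'⟩ <;>
      rcases pvTri q20 with h20 | h20 | ⟨h20, h20'⟩ <;>
        rcases pvTri q22 with h22 | h22 | ⟨h22, h22'⟩ <;>
          simp_all [pvInd, day4_alt_mas]

-- literal-string evaluations used to unfold the templates
lemma pvTL1 : "XMAS".toList = ['X', 'M', 'A', 'S'] := rfl
lemma pvTL2 : "SAMX".toList = ['S', 'A', 'M', 'X'] := rfl
lemma pvTL3 : "....".toList = ['.', '.', '.', '.'] := rfl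
lemma pvTL4 : "X...".toList = ['X', '.', '.', '.'] := rfl
lemma pvTL5 : "M...".toList = ['M', '.', '.', '.'] := rfl
lemma pvTL6 : "A...".toList = ['A', '.', '.', '.'] := rfl
lemma pvTL7 : "S...".toList = ['S', '.', '.', '.'] := rfl
lemma pvTL8 : ".M..".toList = ['.', 'M', '.', '.'] := rfl
lemma pvTL9 : "..A.".toList = ['.', '.', 'A', '.'] := rfl
lemma pvTL10 : "...S".toList = ['.', '.', '.', 'S'] := rfl
lemma pvTL11 : "...X".toList = ['.', '.', '.', 'X'] := rfl
lemma pvTL12 : "..M.".toList = ['.', '.', 'M', '.'] := rfl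
lemma pvTL13 : ".A..".toList = ['.', 'A', '.', '.'] := rfl
lemma pvTL14 : "M.M".toList = ['M', '.', 'M'] := rfl
lemma pvTL15 : ".A.".toList = ['.', 'A', '.'] := rfl
lemma pvTL16 : "S.S".toList = ['S', '.', 'S'] := rfl
lemma pvTL17 : "M.S".toList = ['M', '.', 'S'] := rfl
lemma pvTL18 : "S.M".toList = ['S', '.', 'M'] := rfl

lemma pvBeq1 : (('X' : Char) == '.') = false := by decide
lemma pvBeq2 : (('M' : Char) == '.') = false := by decide
lemma pvBeq3 : (('A' : Char) == '.') = false := by decide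
lemma pvBeq4 : (('S' : Char) == '.') = false := by decide
lemma pvBeq5 : (('.' : Char) == '.') = true := by decide

lemma pvA1_cell (data : List String) (R C r c : Int) :
    pvA data R C day4_WORDS1 r c = pvG data R C r c + pvF data R C r (c + 3) := by
  unfold pvA pvG pvF
  rw [show (c + 3 + -1 : ℤ) = c + 2 from by ring, show (c + 3 + -2 : ℤ) = c + 1 from by ring,
      show (c + 3 + -3 : ℤ) = c from by ring]
  simp only [day4_WORDS1, List.map_cons, List.map_nil, List.sum_cons, List.sum_nil,
    day4_found, pvTL1, pvTL2, pvTL3, pvTL4, pvTL5, pvTL6, pvTL7, pvTL8, pvTL9, pvTL10,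
    pvTL11, pvTL12, pvTL13,
    PySem.List.enumerate_cons, PySem.List.enumerate_nil, List.all_cons, List.all_nil,
    pvBeq1, pvBeq2, pvBeq3, pvBeq4, pvBeq5,
    Bool.true_or, Bool.false_or, Bool.and_true, Bool.true_and]
  simp only [pvAtom]
  norm_num
  linear_combination
    -(pvPair (day4_alt_at data R C r c) (day4_alt_at data R C r (c + 1)) (day4_alt_at data R C r (c + 2)) (day4_alt_at data R C r (c + 3)))
    - (pvPair (day4_alt_at data R C r c) (day4_alt_at data R C (r + 1) c) (day4_alt_at data R C (r + 2) c) (day4_alt_at data R C (r + 3) c))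
    - (pvPair (day4_alt_at data R C r c) (day4_alt_at data R C (r + 1) (c + 1)) (day4_alt_at data R C (r + 2) (c + 2)) (day4_alt_at data R C (r + 3) (c + 3)))
    - (pvPair (day4_alt_at data R C r (c + 3)) (day4_alt_at data R C (r + 1) (c + 2)) (day4_alt_at data R C (r + 2) (c + 1)) (day4_alt_at data R C (r + 3) c))

lemma pvB1_cell (data : List String) (R C r c : Int) :
    pvB1cell data R C r c = pvG data R C r c + pvF data R C r c := by
  have h4 : PySem.List.pyRange 0 4 1 = [0, 1, 2, 3] := by decide
  unfold pvB1cell pvG pvF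
  simp only [day4_alt_dirs, day4_alt_word, h4, List.map_cons, List.map_nil, List.sum_cons,
    List.sum_nil]
  norm_num
  ring

lemma pvA2_cell (data : List String) (R C r c : Int) :
    pvA data R C day4_WORDS2 r c = pvInd (pvB2cond data R C r c) := by
  unfold pvA
  simp only [day4_WORDS2, List.map_cons, List.map_nil, List.sum_cons, List.sum_nil,
    day4_found, pvTL14, pvTL15, pvTL16, pvTL17, pvTL18,
    PySem.List.enumerate_cons, PySem.List.enumerate_nil, List.all_cons, List.all_nil,
    pvBeq1, pvBeq2, pvBeq3, pvBeq4, pvBeq5,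
    Bool.true_or, Bool.false_or, Bool.and_true, Bool.true_and]
  simp only [pvAtom]
  norm_num
  have h := pvCell2 (day4_alt_at data R C r c) (day4_alt_at data R C r (c + 2))
    (day4_alt_at data R C (r + 1) (c + 1)) (day4_alt_at data R C (r + 2) c)
    (day4_alt_at data R C (r + 2) (c + 2))
  unfold pvB2cond
  linear_combination h

-- the anti-diagonal column shift: over a full row of anchors the shifted and unshifted
-- sums agree because pvF vanishes at both margins
lemma pvF_low (data : List String) (R C r x : Int) (h : x < 3) : pvF data R C r x = 0 := by
  have hnone : day4_alt_at data R C (r + 3) (x + -3) = none := by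
    unfold day4_alt_at; rw [if_neg]; omega
  unfold pvF pvInd; simp [hnone]

lemma pvF_high (data : List String) (R C r x : Int) (h : C ≤ x) : pvF data R C r x = 0 := by
  have hnone : day4_alt_at data R C r x = none := by
    unfold day4_alt_at; rw [if_neg]; omega
  unfold pvF pvInd; simp [hnone]

lemma pvRangeSum_shift (F : Int → Int) (n : ℕ) :
    ((List.range n).map (fun (k : ℕ) => F ((k : Int) + 3))).sum + (F 0 + F 1 + F 2)
      = ((List.range n).map (fun (k : ℕ) => F ((k : Int)))).sum + (F (n : Int) + F ((n : Int) + 1) + F ((n : Int) + 2)) := by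
  induction n with
  | zero => simp
  | succ m ih =>
    rw [List.range_succ, List.map_append, List.map_append, List.sum_append, List.sum_append]
    simp only [List.map_cons, List.map_nil, List.sum_cons, List.sum_nil]
    push_cast
    push_cast at ih
    have e1 : ((m : ℤ) + 1 + 1) = (m : ℤ) + 2 := by ring
    have e2 : ((m : ℤ) + 1 + 2) = (m : ℤ) + 3 := by ring
    rw [e1, e2]
    linarith [ih]

lemma pvShift (F : Int → Int) (C : Int) (h0 : ∀ x, x < 3 → F x = 0) (h1 : ∀ x, C ≤ x → F x = 0) :
    ((PySem.List.pyRange 0 C 1).map (fun c => F (c + 3))).sum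
      = ((PySem.List.pyRange 0 C 1).map F).sum := by
  rw [PySem.List.pyRange_one]
  simp only [List.map_map, Function.comp_def, zero_add, sub_zero]
  by_cases hC : 0 ≤ C
  · have key := pvRangeSum_shift F C.toNat
    have ht : ((C.toNat : ℕ) : Int) = C := Int.toNat_of_nonneg hC
    rw [h0 0 (by omega), h0 1 (by omega), h0 2 (by omega),
        h1 _ (by omega), h1 _ (by omega), h1 _ (by omega)] at key
    simpa using key
  · have hz : C.toNat = 0 := by omega
    rw [hz]
    simp

lemma solveA_eq (data : List String) (part2 : Bool) :
    day4_solve data part2 =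
      ((PySem.List.pyRange 0 (data.length : Int) 1).map (fun r =>
        ((PySem.List.pyRange 0 (PySem.Str.len ((PySem.List.pyGet? data 0).getD "")) 1).map (fun c =>
          pvA data (data.length : Int) (PySem.Str.len ((PySem.List.pyGet? data 0).getD ""))
            (if part2 then day4_WORDS2 else day4_WORDS1) r c)).sum)).sum := by
  simp only [day4_solve, day4_parse]
  refine Eq.trans (foldl_body_sum _ _ _ 0 ?_) (zero_add _)
  intro acc r _
  refine foldl_body_sum _ _ _ acc ?_
  intro acc2 c _
  simp only [pvA]
  exact foldl_body_sum _ _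
    (fun w => pvInd (day4_found data (data.length : Int)
      (PySem.Str.len ((PySem.List.pyGet? data 0).getD "")) r c w)) acc2 (pvStep _ _)

set_option maxHeartbeats 1000000 in
lemma solveB1_eq (data : List String) :
    day4_solve_alt data false =
      ((PySem.List.pyRange 0 (data.length : Int) 1).map (fun r =>
        ((PySem.List.pyRange 0 (PySem.Str.len ((PySem.List.pyGet? data 0).getD "")) 1).map (fun c =>
          pvB1cell data (data.length : Int) (PySem.Str.len ((PySem.List.pyGet? data 0).getD "")) r c)).sum)).sum := by
  simp only [day4_solve_alt, Bool.false_eq_true, if_false]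
  generalize PySem.Str.len ((PySem.List.pyGet? data 0).getD "") = C
  generalize ((data.length : Int)) = R
  refine Eq.trans (foldl_body_sum _ _ _ 0 ?_) (zero_add _)
  intro acc r _
  refine foldl_body_sum _ _ _ acc ?_
  intro acc2 c _
  simp only [pvB1cell]
  exact foldl_body_sum _ _ _ acc2 (pvStep _ _)

lemma solveB2_eq (data : List String) :
    day4_solve_alt data true =
      ((PySem.List.pyRange 0 (data.length : Int) 1).map (fun r =>
        ((PySem.List.pyRange 0 (PySem.Str.len ((PySem.List.pyGet? data 0).getD "")) 1).map (fun c =>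
          pvInd (pvB2cond data (data.length : Int) (PySem.Str.len ((PySem.List.pyGet? data 0).getD "")) r c))).sum)).sum := by
  simp only [day4_solve_alt, if_true]
  refine Eq.trans (foldl_body_sum _ _ _ 0 ?_) (zero_add _)
  intro acc r _
  exact foldl_body_sum _ _
    (fun c => pvInd (pvB2cond data (data.length : Int)
      (PySem.Str.len ((PySem.List.pyGet? data 0).getD "")) r c)) acc
    (pvStep (fun c => pvB2cond data (data.length : Int)
      (PySem.Str.len ((PySem.List.pyGet? data 0).getD "")) r c) _)

lemma pvRow1 (data : List String) (R C r : Int) :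
    ((PySem.List.pyRange 0 C 1).map (fun c => pvA data R C day4_WORDS1 r c)).sum
      = ((PySem.List.pyRange 0 C 1).map (fun c => pvB1cell data R C r c)).sum := by
  rw [List.map_congr_left (fun c _ => pvA1_cell data R C r c),
      List.map_congr_left (fun c _ => pvB1_cell data R C r c)]
  rw [PySem.List.sum_map_add_int, PySem.List.sum_map_add_int]
  rw [pvShift (pvF data R C r) C (fun x hx => pvF_low data R C r x hx) (fun x hx => pvF_high data R C r x hx)]

-- ===== VERDICT (by name: the statement is the Claim_ definition above) =====
theorem day4_solve_spec : Claim_equal_day4_solve := by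
  intro data part2 _ _
  unfold Spec_day4_solve
  cases part2 with
  | false =>
    rw [solveA_eq, solveB1_eq]
    exact congrArg List.sum (List.map_congr_left (fun r _ => by
      simp only [Bool.false_eq_true, if_false]
      exact pvRow1 data _ _ r))
  | true =>
    rw [solveA_eq, solveB2_eq]
    exact congrArg List.sum (List.map_congr_left (fun r _ => by
      simp only [if_true]
      exact congrArg List.sum (List.map_congr_left (fun c _ => pvA2_cell data _ _ r c))))
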